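-- pv_equiv track=rewrite | github.com/JeffHanna/Advent_of_Code_2016 | Day_01/01_01.py | _write_each_step
-- ===== SOURCE A (Python) =====
-- def _write_each_step( cur_pos, distance, axis ):
-- 	"""
-- 	Since _get_new_heading is written with 0-2 being Y and 1-3 being X,
-- 	yet the X value being the 0 index of the position tuple this needs
-- 	to be done. Whether it's done  here, in _get_new_heading() or
-- 	by swapping the pos tuple to be ( Y, X ) it is still cumbersome.
--
-- 	**Arguments:**
--
-- 		:``cur_pos``:	`tuple` The current position of the user as ( X, y )
-- 		:``distance``:	`int` The distance to travel
-- 		:``axis``:		`int` The axis on which to travel.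
--
-- 	**Keyword Arguments:**
--
-- 		None
--
-- 	**Returns:**
--
-- 		:`tuple` The new location of the user as ( X, Y )
-- 		:`bool`  True If the user is at a previously visited coordinate,
-- 					otherwise False.
-- 	"""
--
-- 	axis -= 1
-- 	pos = cur_pos
--
-- 	inc = 1 if distance >= 0 else -1
-- 	for _i in range( abs( distance ) ):
-- 		if axis == 0:
-- 			pos = ( pos[ 0 ] + inc, pos[ -1 ] )
-- 		else:
-- 			pos = ( pos[ 0 ], pos[ -1 ] + inc )
--
-- 	return pos, False
-- ===== SOURCE B (Python) =====
-- def _write_each_step(cur_pos, distance, axis):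
--     # Closed form: add the full signed distance to the selected coordinate at once.
--     if distance == 0:
--         return cur_pos, False
--     x, y = cur_pos[0], cur_pos[-1]
--     if axis == 1:
--         return (x + distance, y), False
--     return (x, y + distance), False
-- ===== Notes on version B (the rewrite author's own statement) =====
-- stated objective: simpler
-- what changed: Replaces the step-by-step loop over abs(distance) iterations with a closed-form single addition of the signed distance to the selected coordinate.
import Mathlib
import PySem

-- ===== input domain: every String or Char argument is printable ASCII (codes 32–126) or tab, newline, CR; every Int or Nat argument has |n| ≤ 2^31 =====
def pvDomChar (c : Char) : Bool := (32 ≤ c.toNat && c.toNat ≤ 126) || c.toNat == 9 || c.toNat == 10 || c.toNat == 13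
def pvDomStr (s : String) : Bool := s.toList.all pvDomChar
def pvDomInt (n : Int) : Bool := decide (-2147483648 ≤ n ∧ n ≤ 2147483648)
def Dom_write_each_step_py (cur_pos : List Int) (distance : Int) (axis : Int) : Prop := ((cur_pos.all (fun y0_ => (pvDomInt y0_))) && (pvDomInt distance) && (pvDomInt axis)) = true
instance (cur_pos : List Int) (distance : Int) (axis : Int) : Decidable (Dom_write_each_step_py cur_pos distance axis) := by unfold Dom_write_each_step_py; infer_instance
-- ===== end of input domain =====

-- B replaces A's one-unit-per-iteration loop by a single closed-form addition of the signed distance (objective: simpler).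


-- ===== PORT A =====
-- One loop step of A: pos = (pos[0]+inc, pos[-1]) or (pos[0], pos[-1]+inc).
-- Inside Pre_ the list is nonempty whenever the loop runs, so the .getD 0 default is never taken.
def pvStepA (axis1 inc : Int) (pos : List Int) : List Int :=
  if axis1 == 0 then [((PySem.List.pyGet? pos 0).getD 0) + inc, (PySem.List.pyGet? pos (-1)).getD 0]
  else [(PySem.List.pyGet? pos 0).getD 0, ((PySem.List.pyGet? pos (-1)).getD 0) + inc]

def write_each_step_py (cur_pos : List Int) (distance : Int) (axis : Int) : List Int × Bool :=
  let axis1 := axis - 1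
  let inc : Int := if distance ≥ 0 then 1 else -1
  let pos := (List.range distance.natAbs).foldl (fun pos _i => pvStepA axis1 inc pos) cur_pos
  (pos, false)

-- ===== PORT B =====
def write_each_step_py_alt (cur_pos : List Int) (distance : Int) (axis : Int) : List Int × Bool :=
  if distance = 0 then (cur_pos, false)
  else
    let x := (PySem.List.pyGet? cur_pos 0).getD 0
    let y := (PySem.List.pyGet? cur_pos (-1)).getD 0
    if axis = 1 then ([x + distance, y], false) else ([x, y + distance], false)

-- ===== PRECONDITION & SPEC =====
-- Pre_ excludes only inputs where Python A raises IndexError: an empty position with nonzero distance.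
def Pre_write_each_step_py (cur_pos : List Int) (distance : Int) (_axis : Int) : Prop :=
  cur_pos ≠ [] ∨ distance = 0
instance (cur_pos : List Int) (distance : Int) (axis : Int) : Decidable (Pre_write_each_step_py cur_pos distance axis) := by unfold Pre_write_each_step_py; infer_instance
def pvWitness_write_each_step_py : List Int × Int × Int := ([2, 3], 5, 1)

def Spec_write_each_step_py (cur_pos : List Int) (distance : Int) (axis : Int) (out : List Int × Bool) : Prop := out = write_each_step_py_alt cur_pos distance axis
instance (cur_pos : List Int) (distance : Int) (axis : Int) (out : List Int × Bool) : Decidable (Spec_write_each_step_py cur_pos distance axis out) := by unfold Spec_write_each_step_py; infer_instance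

-- ===== CLAIM (what is proved, stated in full; the proofs are below) =====
def Claim_equal_write_each_step_py : Prop := ∀ (cur_pos : List Int) (distance : Int) (axis : Int), Dom_write_each_step_py cur_pos distance axis → Pre_write_each_step_py cur_pos distance axis → Spec_write_each_step_py cur_pos distance axis (write_each_step_py cur_pos distance axis)

-- ===== LEMMAS AND PROOFS =====

-- foldl of a step ignoring the element is function iteration
theorem pv_foldl_iterate {α β : Type} (g : α → α) (l : List β) (init : α) :
    l.foldl (fun s _ => g s) init = g^[l.length] init := by
  induction l generalizing init with
  | nil => rfl
  | cons b bs ih => simp [List.foldl, ih, Function.iterate_succ_apply]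

-- iterating A's step on a length-2 list adds inc to the chosen coordinate each time
theorem pv_iterate_pair (axis1 inc : Int) (m : Nat) (a b : Int) :
    (pvStepA axis1 inc)^[m] [a, b] =
      if axis1 == 0 then [a + inc * m, b] else [a, b + inc * m] := by
  induction m generalizing a b with
  | zero => split <;> simp
  | succ k ih =>
    rw [Function.iterate_succ_apply]
    by_cases h : axis1 == 0 <;>
      simp [pvStepA, h, ih, PySem.List.pyGet?_neg_one,
        List.getLast?] <;> ring

theorem pv_inc_mul_natAbs (d : Int) : (if d ≥ 0 then (1 : Int) else -1) * d.natAbs = d := by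
  rcases le_or_gt 0 d with h | h
  · simp [h, Int.natAbs_of_nonneg h]
  · have : ¬ d ≥ 0 := by omega
    simp only [if_neg this]
    have h1 : (d.natAbs : Int) = -d := by omega
    rw [h1]; ring

-- ===== VERDICT (by name: the statement is the Claim_ definition above) =====
theorem write_each_step_py_spec : Claim_equal_write_each_step_py := by
  intro cur_pos distance axis _dom hpre
  unfold Spec_write_each_step_py write_each_step_py write_each_step_py_alt
  by_cases hd : distance = 0
  · simp [hd]
  · have hne : cur_pos ≠ [] := by
      rcases hpre with h | h
      · exact h
      · exact absurd h hd
    obtain ⟨c, cs, rfl⟩ := List.exists_cons_of_ne_nil hne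
    have hpos : 0 < distance.natAbs := Int.natAbs_pos.mpr hd
    obtain ⟨m, hm⟩ : ∃ m, distance.natAbs = m + 1 := ⟨distance.natAbs - 1, by omega⟩
    simp only [if_neg hd]
    rw [pv_foldl_iterate, List.length_range, hm, Function.iterate_succ_apply]
    set inc : Int := if distance ≥ 0 then 1 else -1 with hinc
    have hstep : pvStepA (axis - 1) inc (c :: cs) =
        if (axis - 1) == 0 then [c + inc, (c :: cs).getLast (by simp)]
        else [c, (c :: cs).getLast (by simp) + inc] := by
      unfold pvStepA
      rw [PySem.List.pyGet?_zero_cons, PySem.List.pyGet?_neg_one,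
        List.getLast?_eq_some_getLast (by simp)]
      rfl
    rw [hstep]
    have hx : (PySem.List.pyGet? (c :: cs) 0).getD 0 = c := by
      rw [PySem.List.pyGet?_zero_cons]; rfl
    have hy : (PySem.List.pyGet? (c :: cs) (-1)).getD 0 = (c :: cs).getLast (by simp) := by
      rw [PySem.List.pyGet?_neg_one, List.getLast?_eq_some_getLast (by simp)]; rfl
    have hmul : inc * (distance.natAbs : Int) = distance := pv_inc_mul_natAbs distance
    by_cases hax : axis = 1
    · have h0 : ((axis - 1) == 0) = true := by simp [hax]
      rw [if_pos h0, pv_iterate_pair, if_pos h0]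
      simp [hax, hy]
      have : c + inc + inc * (m : Int) = c + distance := by
        rw [← hmul, hm]; push_cast; ring
      omega
    · have h0 : ((axis - 1) == 0) = false := by
        simp; omega
      rw [if_neg (by simp [h0]), pv_iterate_pair, if_neg (by simp [h0])]
      simp [hax, hy]
      have : (c :: cs).getLast (by simp) + inc + inc * (m : Int) = (c :: cs).getLast (by simp) + distance := by
        rw [← hmul, hm]; push_cast; ring
      omega
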